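-- pv_equiv track=rewrite | github.com/XRRRA/LFA_LABS | Lab 4/Lab4.py | explain_pattern_processing
-- ===== SOURCE A (Python) =====
-- def explain_pattern_processing(pattern: str) -> list:
--     explanation = []
--     i = 0
--     while i < len(pattern):
--         char = pattern[i]
--         if char == '(':
--             j = i + 1
--             subpattern = ""
--             while pattern[j] != ')':
--                 subpattern += pattern[j]
--                 j += 1
--             choices = subpattern.split('|')
--             explanation.append(f"Select one of: {choices}")
--             i = j + 1
--             # Handling special characters '^', '*', '+', '?'
--             if j + 1 < len(pattern):
--                 next_char = pattern[j + 1]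
--                 if next_char == '^':
--                     repeat = int(pattern[j + 2])
--                     explanation.append(f"Repeat the selection {repeat} times")
--                     i = j + 3
--                 elif next_char == '*':
--                     explanation.append("Randomly repeat zero to three times")
--                     i = j + 2
--                 elif next_char == '+':
--                     explanation.append("Randomly repeat one to three times")
--                     i = j + 2
--                 elif next_char == '?':
--                     explanation.append("Randomly repeat zero or one time")
--                     i = j + 2
--             continue
--         # Handling special characters '*', '+', '?', '^'
--         next_char = pattern[i + 1] if i + 1 < len(pattern) else ""
--         if next_char == '^':
--             repeat = int(pattern[i + 2])
--             explanation.append(f"Repeat {char} {repeat} times")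
--             i += 3
--             continue
--         elif next_char == '*':
--             explanation.append(f"Randomly repeat {char} zero to five times")
--             i += 2
--             continue
--         elif next_char == '+':
--             explanation.append(f"Randomly repeat {char} one to five times")
--             i += 2
--             continue
--         elif next_char == '?':
--             explanation.append(f"Randomly repeat {char} zero or one time")
--             i += 2
--             continue
--         explanation.append(f"Use character: {char}")
--         i += 1
--
--     return explanation
-- ===== SOURCE B (Python) =====
-- def explain_pattern_processing(pattern: str) -> list:
--     # Pass 1: tokenize into (kind, payload, quantifier) triples.
--     tokens = []
--     n = len(pattern)
--     i = 0
--     while i < n: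
--         if pattern[i] == '(':
--             j = pattern.index(')', i + 1)
--             atom = ('group', pattern[i + 1:j].split('|'))
--             i = j + 1
--         else:
--             atom = ('char', pattern[i])
--             i += 1
--         quant = None
--         if i < n:
--             q = pattern[i]
--             if q == '^':
--                 quant = ('^', int(pattern[i + 1]))
--                 i += 2
--             elif q in '*+?':
--                 quant = q
--                 i += 1
--         tokens.append((atom, quant))
--
--     # Pass 2: render each token into one or two explanation lines.
--     out = []
--     for (kind, payload), quant in tokens:
--         if kind == 'group':
--             out.append(f"Select one of: {payload}")
--             if quant is None:
--                 continue
--             if quant == '*':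
--                 out.append("Randomly repeat zero to three times")
--             elif quant == '+':
--                 out.append("Randomly repeat one to three times")
--             elif quant == '?':
--                 out.append("Randomly repeat zero or one time")
--             else:
--                 out.append(f"Repeat the selection {quant[1]} times")
--         else:
--             if quant is None:
--                 out.append(f"Use character: {payload}")
--             elif quant == '*':
--                 out.append(f"Randomly repeat {payload} zero to five times")
--             elif quant == '+':
--                 out.append(f"Randomly repeat {payload} one to five times")
--             elif quant == '?':
--                 out.append(f"Randomly repeat {payload} zero or one time")
--             else:
--                 out.append(f"Repeat {payload} {quant[1]} times")
--     return out
-- ===== Notes on version B (the rewrite author's own statement) =====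
-- stated objective: alternative
-- what changed: B replaces A's single fused scan-and-append while-loop by two separated passes: a tokenizer that turns the pattern into a list of (atom, quantifier) tokens, then a renderer that maps each token to its explanation line(s).
-- outside the precondition, e.g. on explain_pattern_processing('('): A raises IndexError, B raises ValueError; on explain_pattern_processing('x^'): A raises IndexError, B raises IndexError; on explain_pattern_processing('a^b'): A raises ValueError, B raises ValueError
import Mathlib
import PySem

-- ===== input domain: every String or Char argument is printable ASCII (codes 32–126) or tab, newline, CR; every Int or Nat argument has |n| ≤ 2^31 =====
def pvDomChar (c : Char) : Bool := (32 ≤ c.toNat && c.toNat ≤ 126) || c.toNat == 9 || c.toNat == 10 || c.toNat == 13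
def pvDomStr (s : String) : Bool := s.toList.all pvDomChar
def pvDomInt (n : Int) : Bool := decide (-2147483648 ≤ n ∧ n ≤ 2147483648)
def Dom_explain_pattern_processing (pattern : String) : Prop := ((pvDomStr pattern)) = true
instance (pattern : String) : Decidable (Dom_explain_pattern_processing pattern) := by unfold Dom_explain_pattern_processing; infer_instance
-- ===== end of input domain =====

-- B re-implements A as two separated passes (a tokenizer producing (atom, quantifier) tokens, then a
-- renderer), instead of A's single fused scan-and-append loop; same cost, objective: alternative decomposition.

-- Python's repr of a str (exact for the printable-ASCII + tab/newline/CR domain), as used by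
-- f"{choices}" in both Pythons (str.__repr__ escapes \, \t, \n, \r and the chosen quote).
def pyEsc (q : Char) (c : Char) : List Char :=
  if c = '\\' then ['\\', '\\']
  else if c = '\t' then ['\\', 't']
  else if c = '\n' then ['\\', 'n']
  else if c = '\r' then ['\\', 'r']
  else if c = q then ['\\', q]
  else [c]

def pyStrRepr (s : List Char) : List Char :=
  let q : Char := if s.contains '\'' && ! s.contains '"' then '"' else '\''
  q :: s.flatMap (pyEsc q) ++ [q]

-- Python's repr of a list of str: "['a', 'b']"
def pyStrListRepr (xs : List (List Char)) : String :=
  String.ofList ('[' :: (List.intercalate [',', ' '] (xs.map pyStrRepr)) ++ [']'])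

-- ===== PORT A =====
-- A's inner while loop "while pattern[j] != ')': subpattern += pattern[j]; j += 1":
-- returns (subpattern, rest after the ')'); none = IndexError (no ')').
def scanA : List Char → Option (List Char × List Char)
  | [] => none
  | c :: cs =>
    if c = ')' then some ([], cs)
    else match scanA cs with
      | some (s, r) => some (c :: s, r)
      | none => none

theorem scanA_len : ∀ (cs s r : List Char), scanA cs = some (s, r) → r.length < cs.length := by
  intro cs
  induction cs with
  | nil => intro s r h; simp [scanA] at h
  | cons c cs ih =>
    intro s r h
    by_cases hc : c = ')'
    · simp [scanA, hc] at h
      simp [← h.2, List.length_cons]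
    · simp only [scanA, if_neg hc] at h
      cases hs : scanA cs with
      | none => rw [hs] at h; simp at h
      | some p =>
        rw [hs] at h; simp at h
        have := ih p.1 p.2 (by rw [hs])
        rw [← h.2]
        simp [List.length_cons]; omega

-- literal transliteration of A's while loop over the remaining characters
def goA : List Char → List String
  | [] => []
  | c :: cs =>
    if c = '(' then
      match hs : scanA cs with
      | none => []            -- IndexError: unterminated '(' (outside Pre_)
      | some (sub, rest) =>
        let line := "Select one of: " ++ pyStrListRepr (PySem.Chars.splitOn sub ['|'])
        match rest with
        | [] => [line]        -- j + 1 = len(pattern): loop ends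
        | nc :: rs =>
          if nc = '^' then
            match rs with
            | d :: rs' =>
              match PySem.Int.ofStr? (String.ofList [d]) with
              | some k => line :: ("Repeat the selection " ++ PySem.Int.toStr k ++ " times") :: goA rs'
              | none => [line]  -- ValueError (outside Pre_)
            | [] => [line]      -- IndexError (outside Pre_)
          else if nc = '*' then line :: "Randomly repeat zero to three times" :: goA rs
          else if nc = '+' then line :: "Randomly repeat one to three times" :: goA rs
          else if nc = '?' then line :: "Randomly repeat zero or one time" :: goA rs
          else line :: goA (nc :: rs)
    else
      match cs with
      | [] => ["Use character: " ++ String.ofList [c]]   -- next_char = ""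
      | nc :: rs =>
        if nc = '^' then
          match rs with
          | d :: rs' =>
            match PySem.Int.ofStr? (String.ofList [d]) with
            | some k => ("Repeat " ++ String.ofList [c] ++ " " ++ PySem.Int.toStr k ++ " times") :: goA rs'
            | none => []      -- ValueError (outside Pre_)
          | [] => []          -- IndexError (outside Pre_)
        else if nc = '*' then ("Randomly repeat " ++ String.ofList [c] ++ " zero to five times") :: goA rs
        else if nc = '+' then ("Randomly repeat " ++ String.ofList [c] ++ " one to five times") :: goA rs
        else if nc = '?' then ("Randomly repeat " ++ String.ofList [c] ++ " zero or one time") :: goA rs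
        else ("Use character: " ++ String.ofList [c]) :: goA (nc :: rs)
termination_by l => l.length
decreasing_by
  all_goals
    first
      | (have := scanA_len _ _ _ hs; simp only [List.length_cons] at this ⊢; omega)
      | (simp only [List.length_cons]; omega)

def explain_pattern_processing (pattern : String) : List String := goA pattern.toList

-- ===== PORT B =====
inductive PQuant
  | pow : Int → PQuant
  | star
  | plus
  | opt
deriving DecidableEq, Repr

inductive PTok
  | group : List (List Char) → Option PQuant → PTok
  | chr : Char → Option PQuant → PTok
deriving DecidableEq, Repr

-- B's quantifier read after an atom; none = exception in B (outside Pre_)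
def readQuant : List Char → Option (Option PQuant × List Char)
  | [] => some (none, [])
  | q :: rs =>
    if q = '^' then
      match rs with
      | d :: rs' =>
        match PySem.Int.ofStr? (String.ofList [d]) with
        | some k => some (some (.pow k), rs')
        | none => none
      | [] => none
    else if q = '*' then some (some .star, rs)
    else if q = '+' then some (some .plus, rs)
    else if q = '?' then some (some .opt, rs)
    else some (none, q :: rs)

-- B's loop body: read one (atom, quantifier) token; none = exception in B (outside Pre_)
def readTok : List Char → Option (PTok × List Char)
  | [] => none
  | c :: cs =>
    if c = '(' then
      match cs.span (· ≠ ')') with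
      | (sub, ')' :: rest') =>
        match readQuant rest' with
        | some (q, rs) => some (.group (PySem.Chars.splitOn sub ['|']) q, rs)
        | none => none
      | _ => none             -- no ')': pattern.index raises
    else
      match readQuant cs with
      | some (q, rs) => some (.chr c q, rs)
      | none => none

theorem readQuant_len : ∀ (l : List Char) (q : Option PQuant) (r : List Char),
    readQuant l = some (q, r) → r.length ≤ l.length := by
  intro l q r h
  rw [readQuant.eq_def] at h
  split at h
  · simp at h; simp [← h.2]
  · split at h
    · split at h
      · split at h
        · simp at h; simp [← h.2, List.length_cons]; omega
        · simp at h
      · simp at h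
    · split at h
      · simp at h; simp [← h.2, List.length_cons]
      · split at h
        · simp at h; simp [← h.2, List.length_cons]
        · split at h
          · simp at h; simp [← h.2, List.length_cons]
          · simp at h; simp [← h.2]

theorem span_parts (cs sub rest' : List Char) (h : cs.span (· ≠ ')') = (sub, ')' :: rest')) :
    sub ++ ')' :: rest' = cs := by
  rw [List.span_eq_takeWhile_dropWhile] at h
  have h1 : cs.takeWhile (· ≠ ')') = sub := congrArg Prod.fst h
  have h2 : cs.dropWhile (· ≠ ')') = ')' :: rest' := congrArg Prod.snd h
  rw [← h1, ← h2]
  exact List.takeWhile_append_dropWhile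

theorem readTok_len : ∀ (l : List Char) (t : PTok) (r : List Char),
    readTok l = some (t, r) → r.length < l.length := by
  intro l t r h
  rw [readTok.eq_def] at h
  split at h
  · simp at h
  · rename_i c cs
    split at h
    · split at h
      · rename_i sub rest' hspan
        split at h
        · rename_i q rs hq
          simp at h
          have h1 := readQuant_len _ _ _ hq
          have h2 := span_parts cs sub rest' hspan
          have : rest'.length < cs.length := by
            rw [← h2]; simp [List.length_append, List.length_cons]; omega
          rw [← h.2]; simp [List.length_cons]; omega
        · simp at h
      · simp at h
    · split at h
      · rename_i q rs hq
        simp at h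
        have h1 := readQuant_len _ _ _ hq
        rw [← h.2]; simp [List.length_cons]; omega
      · simp at h

-- pass 1: tokenize
def tokB : List Char → List PTok
  | [] => []
  | c :: cs =>
    match ht : readTok (c :: cs) with
    | some (t, rs) => t :: tokB rs
    | none => []              -- exception (outside Pre_)
termination_by l => l.length
decreasing_by exact readTok_len _ _ _ ht

-- pass 2: render one token into its explanation line(s)
def renderB : PTok → List String
  | .group chs q =>
    ("Select one of: " ++ pyStrListRepr chs) ::
      (match q with
       | none => []
       | some (.pow k) => ["Repeat the selection " ++ PySem.Int.toStr k ++ " times"]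
       | some .star => ["Randomly repeat zero to three times"]
       | some .plus => ["Randomly repeat one to three times"]
       | some .opt => ["Randomly repeat zero or one time"])
  | .chr c q =>
    match q with
    | none => ["Use character: " ++ String.ofList [c]]
    | some (.pow k) => ["Repeat " ++ String.ofList [c] ++ " " ++ PySem.Int.toStr k ++ " times"]
    | some .star => ["Randomly repeat " ++ String.ofList [c] ++ " zero to five times"]
    | some .plus => ["Randomly repeat " ++ String.ofList [c] ++ " one to five times"]
    | some .opt => ["Randomly repeat " ++ String.ofList [c] ++ " zero or one time"]

def explain_pattern_processing_alt (pattern : String) : List String :=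
  (tokB pattern.toList).flatMap renderB

-- ===== PRECONDITION & SPEC =====
-- A pattern is well-formed iff this five-state scan accepts it: an atom is '(…)' or a single
-- character, optionally followed by '*', '+', '?', or '^' plus one int-parsable character.
inductive WSt
  | atom   -- expecting the next atom (or end of pattern)
  | grp    -- inside '(...)', waiting for ')'
  | quant  -- just after an atom: a quantifier may follow
  | dig    -- just after '^': one digit required
  | bad    -- rejected
deriving DecidableEq, Repr

def wfStep : WSt → Char → WSt
  | .atom, c => if c = '(' then .grp else .quant
  | .grp, c => if c = ')' then .quant else .grp
  | .quant, c =>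
    if c = '^' then .dig
    else if c = '*' then .atom
    else if c = '+' then .atom
    else if c = '?' then .atom
    else if c = '(' then .grp
    else .quant
  | .dig, c => if (PySem.Int.ofChars? [c]).isSome then .atom else .bad
  | .bad, _ => .bad

def wfAccept : WSt → Bool
  | .atom => true
  | .quant => true
  | _ => false

-- Pre_ excludes exactly the malformed patterns on which A raises: IndexError on an unterminated
-- group opener or on a quantifier-position caret at the very end, ValueError on such a caret
-- followed by a non-digit; the pattern must be accepted by the finite-state shape check above.
def Pre_explain_pattern_processing (pattern : String) : Prop :=
  wfAccept (pattern.toList.foldl wfStep .atom) = true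
instance (pattern : String) : Decidable (Pre_explain_pattern_processing pattern) := by
  unfold Pre_explain_pattern_processing; infer_instance

def pvWitness_explain_pattern_processing : String := "a(b|c)^2d*"

def Spec_explain_pattern_processing (pattern : String) (out : List String) : Prop := out = explain_pattern_processing_alt pattern
instance (pattern : String) (out : List String) : Decidable (Spec_explain_pattern_processing pattern out) := by unfold Spec_explain_pattern_processing; infer_instance

-- ===== CLAIM (what is proved, stated in full; the proofs are below) =====
def Claim_equal_explain_pattern_processing : Prop := ∀ (pattern : String), Dom_explain_pattern_processing pattern → Pre_explain_pattern_processing pattern → Spec_explain_pattern_processing pattern (explain_pattern_processing pattern)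

-- ===== LEMMAS AND PROOFS =====

-- skip one quantifier (if any); none = malformed ('^' not followed by a digit)
def chompQ : List Char → Option (List Char)
  | [] => some []
  | q :: rs =>
    if q = '^' then
      match rs with
      | d :: rs' => if (PySem.Int.ofStr? (String.ofList [d])).isSome then some rs' else none
      | [] => none
    else if q = '*' then some rs
    else if q = '+' then some rs
    else if q = '?' then some rs
    else some (q :: rs)

-- skip one well-formed atom-plus-quantifier; none = malformed
def chomp : List Char → Option (List Char)
  | [] => none
  | c :: cs =>
    if c = '(' then
      match cs.span (· ≠ ')') with
      | (_, ')' :: rest') => chompQ rest'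
      | _ => none             -- unterminated '('
    else chompQ cs

theorem chompQ_len : ∀ (l r : List Char), chompQ l = some r → r.length ≤ l.length := by
  intro l r h
  rw [chompQ.eq_def] at h
  split at h
  · simp at h; simp [← h]
  · split at h
    · split at h
      · split at h
        · simp at h; simp [← h, List.length_cons]; omega
        · simp at h
      · simp at h
    · split at h
      · simp at h; simp [← h, List.length_cons]
      · split at h
        · simp at h; simp [← h, List.length_cons]
        · split at h
          · simp at h; simp [← h, List.length_cons]
          · simp at h; simp [← h]

theorem chomp_len : ∀ (l r : List Char), chomp l = some r → r.length < l.length := by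
  intro l r h
  rw [chomp.eq_def] at h
  split at h
  · simp at h
  · rename_i c cs
    split at h
    · split at h
      · rename_i sub rest' hspan
        have h1 := chompQ_len _ _ h
        have h2 := span_parts cs sub rest' hspan
        have : rest'.length < cs.length := by
          rw [← h2]; simp [List.length_append, List.length_cons]; omega
        simp [List.length_cons]; omega
      · simp at h
    · have h1 := chompQ_len _ _ h
      simp [List.length_cons]; omega

def wf : List Char → Bool
  | [] => true
  | c :: cs =>
    match hch : chomp (c :: cs) with
    | some rs => wf rs
    | none => false
termination_by l => l.length
decreasing_by exact chomp_len _ _ hch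


-- A's ')'-scan agrees with B's span-based split
theorem scanA_eq_span (cs : List Char) :
    scanA cs = (match cs.span (· ≠ ')') with
                | (s, ')' :: r) => some (s, r)
                | _ => none) := by
  induction cs with
  | nil => simp [scanA, List.span_eq_takeWhile_dropWhile]
  | cons c cs ih =>
    by_cases hc : c = ')'
    · simp [scanA, hc, List.span_eq_takeWhile_dropWhile]
    · simp only [scanA, if_neg hc, List.span_eq_takeWhile_dropWhile] at ih ⊢
      rw [ih]
      simp only [List.takeWhile_cons, List.dropWhile_cons,
        show (decide (c ≠ ')') = true) from by simp [hc], if_true]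
      rcases hd : cs.dropWhile (· ≠ ')') with _ | ⟨d, ds⟩
      · simp
      · by_cases hdd : d = ')'
        · simp [hdd]
        · simp [hdd]

-- one step: a well-formed input yields one token, and A's loop emits exactly its rendering
theorem readTok_cons (c : Char) (cs : List Char) :
    readTok (c :: cs) =
      (if c = '(' then
        (match cs.span (· ≠ ')') with
         | (sub, ')' :: rest') =>
           (match readQuant rest' with
            | some (q, rs) => some (.group (PySem.Chars.splitOn sub ['|']) q, rs)
            | none => none)
         | _ => none)
      else
        (match readQuant cs with
         | some (q, rs) => some (.chr c q, rs)
         | none => none)) := rfl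

theorem goA_g_nil (cs sub : List Char) (hscan : scanA cs = some (sub, [])) :
    goA ('(' :: cs) = ["Select one of: " ++ pyStrListRepr (PySem.Chars.splitOn sub ['|'])] := by
  rw [goA.eq_def]; simp only []; repeat' split
  all_goals simp_all

theorem goA_g_pow (cs sub : List Char) (d : Char) (rs' : List Char) (k : Int)
    (hscan : scanA cs = some (sub, '^' :: d :: rs'))
    (ho : PySem.Int.ofChars? [d] = some k) :
    goA ('(' :: cs) = ("Select one of: " ++ pyStrListRepr (PySem.Chars.splitOn sub ['|'])) ::
      ("Repeat the selection " ++ PySem.Int.toStr k ++ " times") :: goA rs' := by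
  rw [goA.eq_def]; simp only []; repeat' split
  all_goals simp_all

theorem goA_g_star (cs sub rs : List Char) (hscan : scanA cs = some (sub, '*' :: rs)) :
    goA ('(' :: cs) = ("Select one of: " ++ pyStrListRepr (PySem.Chars.splitOn sub ['|'])) :: "Randomly repeat zero to three times" :: goA rs := by
  rw [goA.eq_def]; simp only []; repeat' split
  all_goals simp_all

theorem goA_g_plus (cs sub rs : List Char) (hscan : scanA cs = some (sub, '+' :: rs)) :
    goA ('(' :: cs) = ("Select one of: " ++ pyStrListRepr (PySem.Chars.splitOn sub ['|'])) :: "Randomly repeat one to three times" :: goA rs := by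
  rw [goA.eq_def]; simp only []; repeat' split
  all_goals simp_all

theorem goA_g_opt (cs sub rs : List Char) (hscan : scanA cs = some (sub, '?' :: rs)) :
    goA ('(' :: cs) = ("Select one of: " ++ pyStrListRepr (PySem.Chars.splitOn sub ['|'])) :: "Randomly repeat zero or one time" :: goA rs := by
  rw [goA.eq_def]; simp only []; repeat' split
  all_goals simp_all

theorem goA_g_other (cs sub : List Char) (nc : Char) (rs : List Char)
    (hscan : scanA cs = some (sub, nc :: rs))
    (hn : nc ≠ '^') (h2 : nc ≠ '*') (h3 : nc ≠ '+') (h4 : nc ≠ '?') :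
    goA ('(' :: cs) = ("Select one of: " ++ pyStrListRepr (PySem.Chars.splitOn sub ['|'])) :: goA (nc :: rs) := by
  have hn' : ('^' : Char) ≠ nc := Ne.symm hn
  have h2' : ('*' : Char) ≠ nc := Ne.symm h2
  have h3' : ('+' : Char) ≠ nc := Ne.symm h3
  have h4' : ('?' : Char) ≠ nc := Ne.symm h4
  rw [goA.eq_def]; simp only []; repeat' split
  all_goals simp_all

theorem stepA (c : Char) (cs : List Char) (h : wf (c :: cs) = true) :
    ∃ t rs, readTok (c :: cs) = some (t, rs) ∧ wf rs = true ∧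
      goA (c :: cs) = renderB t ++ goA rs := by
  rw [wf] at h
  rcases hch : chomp (c :: cs) with _ | rs
  · rw [hch] at h; simp at h
  · rw [hch] at h
    have hwf : wf rs = true := h
    clear h
    rw [show chomp (c :: cs) = (if c = '(' then
          (match cs.span (· ≠ ')') with
           | (_, ')' :: rest') => chompQ rest'
           | _ => none)
          else chompQ cs) from rfl] at hch
    by_cases hc : c = '('
    · rw [if_pos hc] at hch
      subst hc
      rcases hspan : cs.span (· ≠ ')') with ⟨sub, rest0⟩
      rw [hspan] at hch
      rcases rest0 with _ | ⟨r0, rest'⟩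
      · simp at hch
      · by_cases hr0 : r0 = ')'
        · subst hr0
          simp only at hch
          have hscan : scanA cs = some (sub, rest') := by
            rw [scanA_eq_span, hspan]; rfl
          rcases rest' with _ | ⟨nc, rs0⟩
          · simp [chompQ] at hch
            subst hch
            refine ⟨.group (PySem.Chars.splitOn sub ['|']) none, [], ?_, hwf, ?_⟩
            · rw [readTok_cons, if_pos rfl, hspan]; simp [readQuant]
            · rw [goA_g_nil _ _ hscan]; simp [renderB, goA]
          · by_cases hn : nc = '^'
            · subst hn
              rcases rs0 with _ | ⟨d, rs1⟩
              · simp [chompQ] at hch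
              · rcases ho : PySem.Int.ofChars? [d] with _ | k
                · simp [chompQ, ho] at hch
                · simp [chompQ, ho] at hch
                  subst hch
                  refine ⟨.group (PySem.Chars.splitOn sub ['|']) (some (.pow k)), rs1, ?_, hwf, ?_⟩
                  · rw [readTok_cons, if_pos rfl, hspan]; simp [readQuant, ho]
                  · rw [goA_g_pow _ _ _ _ _ hscan ho]; simp [renderB]
            · by_cases h2 : nc = '*'
              · subst h2
                simp [chompQ] at hch
                subst hch
                refine ⟨.group (PySem.Chars.splitOn sub ['|']) (some .star), rs0, ?_, hwf, ?_⟩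
                · rw [readTok_cons, if_pos rfl, hspan]; simp [readQuant]
                · rw [goA_g_star _ _ _ hscan]; simp [renderB]
              · by_cases h3 : nc = '+'
                · subst h3
                  simp [chompQ] at hch
                  subst hch
                  refine ⟨.group (PySem.Chars.splitOn sub ['|']) (some .plus), rs0, ?_, hwf, ?_⟩
                  · rw [readTok_cons, if_pos rfl, hspan]; simp [readQuant]
                  · rw [goA_g_plus _ _ _ hscan]; simp [renderB]
                · by_cases h4 : nc = '?'
                  · subst h4
                    simp [chompQ] at hch
                    subst hch
                    refine ⟨.group (PySem.Chars.splitOn sub ['|']) (some .opt), rs0, ?_, hwf, ?_⟩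
                    · rw [readTok_cons, if_pos rfl, hspan]; simp [readQuant]
                    · rw [goA_g_opt _ _ _ hscan]; simp [renderB]
                  · simp [chompQ, hn, h2, h3, h4] at hch
                    subst hch
                    refine ⟨.group (PySem.Chars.splitOn sub ['|']) none, nc :: rs0, ?_, hwf, ?_⟩
                    · rw [readTok_cons, if_pos rfl, hspan]; simp [readQuant, hn, h2, h3, h4]
                    · rw [goA_g_other _ _ _ _ hscan hn h2 h3 h4]; simp [renderB]
        · simp [hr0] at hch
    · rw [if_neg hc] at hch
      rcases cs with _ | ⟨nc, rs0⟩
      · simp [chompQ] at hch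
        subst hch
        refine ⟨.chr c none, [], ?_, hwf, ?_⟩
        · rw [readTok_cons, if_neg hc]; simp [readQuant]
        · rw [goA.eq_def]; simp [hc, renderB, goA]
      · by_cases hn : nc = '^'
        · subst hn
          rcases rs0 with _ | ⟨d, rs1⟩
          · simp [chompQ] at hch
          · rcases ho : PySem.Int.ofChars? [d] with _ | k
            · simp [chompQ, ho] at hch
            · simp [chompQ, ho] at hch
              subst hch
              refine ⟨.chr c (some (.pow k)), rs1, ?_, hwf, ?_⟩
              · rw [readTok_cons, if_neg hc]; simp [readQuant, ho]
              · rw [goA.eq_def]; simp [hc, renderB, ho]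
        · by_cases h2 : nc = '*'
          · subst h2
            simp [chompQ] at hch
            subst hch
            refine ⟨.chr c (some .star), rs0, ?_, hwf, ?_⟩
            · rw [readTok_cons, if_neg hc]; simp [readQuant]
            · rw [goA.eq_def]; simp [hc, renderB]
          · by_cases h3 : nc = '+'
            · subst h3
              simp [chompQ] at hch
              subst hch
              refine ⟨.chr c (some .plus), rs0, ?_, hwf, ?_⟩
              · rw [readTok_cons, if_neg hc]; simp [readQuant]
              · rw [goA.eq_def]; simp [hc, renderB]
            · by_cases h4 : nc = '?'
              · subst h4
                simp [chompQ] at hch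
                subst hch
                refine ⟨.chr c (some .opt), rs0, ?_, hwf, ?_⟩
                · rw [readTok_cons, if_neg hc]; simp [readQuant]
                · rw [goA.eq_def]; simp [hc, renderB]
              · simp [chompQ, hn, h2, h3, h4] at hch
                subst hch
                refine ⟨.chr c none, nc :: rs0, ?_, hwf, ?_⟩
                · rw [readTok_cons, if_neg hc]; simp [readQuant, hn, h2, h3, h4]
                · rw [goA.eq_def]; simp [hc, renderB, hn, h2, h3, h4]

theorem main_eq : ∀ (l : List Char), wf l = true → goA l = (tokB l).flatMap renderB := by
  intro l
  induction hn : l.length using Nat.strong_induction_on generalizing l with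
  | _ n ih =>
    match l with
    | [] => intro _; simp [goA, tokB]
    | c :: cs =>
      intro hwf
      obtain ⟨t, rs, hrt, hwfrs, hgo⟩ := stepA c cs hwf
      have hlen : rs.length < (c :: cs).length := readTok_len _ _ _ hrt
      rw [hgo, tokB, hrt]
      simp only [List.flatMap_cons]
      rw [ih rs.length (by omega) rs rfl hwfrs]

theorem bad_run : ∀ (l : List Char), l.foldl wfStep .bad = .bad := by
  intro l
  induction l with
  | nil => rfl
  | cons c cs ih => simp [List.foldl_cons, wfStep, ih]

theorem grp_run : ∀ (cs : List Char),
    cs.foldl wfStep .grp = (match cs.dropWhile (· ≠ ')') with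
                            | ')' :: rest' => rest'.foldl wfStep .quant
                            | _ => WSt.grp) := by
  intro cs
  induction cs with
  | nil => simp
  | cons c cs ih =>
    by_cases hc : c = ')'
    · simp [List.foldl_cons, wfStep, hc, List.dropWhile_cons]
    · simp only [List.foldl_cons, wfStep, if_neg hc, List.dropWhile_cons,
        show (decide (c ≠ ')') = true) from by simp [hc], if_true]
      exact ih

theorem quant_run : ∀ (rest : List Char),
    wfAccept (rest.foldl wfStep .quant) =
      (match chompQ rest with
       | some rs => wfAccept (rs.foldl wfStep .atom)
       | none => false) := by
  intro rest
  rcases rest with _ | ⟨c, cs⟩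
  · simp [chompQ, wfAccept]
  · by_cases hn : c = '^'
    · subst hn
      rcases cs with _ | ⟨d, rs⟩
      · simp [chompQ, List.foldl_cons, wfStep, wfAccept]
      · rcases ho : (PySem.Int.ofChars? [d]).isSome with _ | _
        · simp [chompQ, ho, List.foldl_cons, wfStep, bad_run, wfAccept]
        · simp [chompQ, ho, List.foldl_cons, wfStep]
    · by_cases h2 : c = '*'
      · simp [chompQ, hn, h2, List.foldl_cons, wfStep]
      · by_cases h3 : c = '+'
        · simp [chompQ, hn, h2, h3, List.foldl_cons, wfStep]
        · by_cases h4 : c = '?'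
          · simp [chompQ, hn, h2, h3, h4, List.foldl_cons, wfStep]
          · simp [chompQ, hn, h2, h3, h4, List.foldl_cons, wfStep]

theorem wf2_eq : ∀ (l : List Char), wfAccept (l.foldl wfStep .atom) = wf l := by
  intro l
  induction hn : l.length using Nat.strong_induction_on generalizing l with
  | _ n ih =>
    match l with
    | [] => simp [wf, wfAccept]
    | c :: cs =>
      rw [wf]
      rw [show chomp (c :: cs) = (if c = '(' then
            (match cs.span (· ≠ ')') with
             | (_, ')' :: rest') => chompQ rest'
             | _ => none)
            else chompQ cs) from rfl]
      by_cases hc : c = '('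
      · rw [if_pos hc]
        subst hc
        have hst : wfStep WSt.atom '(' = WSt.grp := rfl
        simp only [List.foldl_cons, hst]
        rcases hspan : cs.span (· ≠ ')') with ⟨sub, rest0⟩
        have hdw : cs.dropWhile (· ≠ ')') = rest0 := by
          have h0 := List.span_eq_takeWhile_dropWhile (fun x => decide (x ≠ ')')) cs
          rw [h0] at hspan
          exact congrArg Prod.snd hspan
        rw [grp_run, hdw]
        rcases rest0 with _ | ⟨r0, rest'⟩
        · simp [wfAccept]
        · by_cases hr0 : r0 = ')'
          · subst hr0
            simp only
            rw [quant_run]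
            have hred : (match ((sub, ')' :: rest') : List Char × List Char) with
                         | (_, ')' :: rest'') => chompQ rest''
                         | _ => none) = chompQ rest' := rfl
            rw [hred]
            rcases hch : chompQ rest' with _ | rs
            · rfl
            · simp only
              have h1 := chompQ_len _ _ hch
              have h2 := span_parts cs sub rest' hspan
              have : rest'.length < cs.length := by
                rw [← h2]; simp [List.length_append, List.length_cons]; omega
              exact ih rs.length (by subst hn; simp [List.length_cons]; omega) rs rfl
          · repeat' split
            all_goals simp_all [wfAccept]
      · rw [if_neg hc]
        have hstate : wfStep .atom c = .quant := by simp [wfStep, hc]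
        simp only [List.foldl_cons, hstate]
        rw [quant_run]
        rcases hch : chompQ cs with _ | rs
        · rfl
        · simp only
          have h1 := chompQ_len _ _ hch
          exact ih rs.length (by subst hn; simp [List.length_cons]; omega) rs rfl

-- ===== VERDICT (by name: the statement is the Claim_ definition above) =====
theorem explain_pattern_processing_spec : Claim_equal_explain_pattern_processing := by
  intro p _ hpre
  unfold Pre_explain_pattern_processing at hpre
  rw [wf2_eq] at hpre
  unfold Spec_explain_pattern_processing explain_pattern_processing explain_pattern_processing_alt
  exact main_eq p.toList hpre
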